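-- pv_equiv track=rewrite | github.com/emilianstoyanov/projects-softuni | Python_Fundamentals/functions_exercise/08.array_manipulator.py | last_elements
-- ===== SOURCE A (Python) =====
-- def last_elements(numbers, count, type):
--     new_arr = []
--
--     if type == "odd":
--         for i in range(len(numbers) - 1, -1, -1):
--             if numbers[i] % 2 != 0 and count > 0:
--                 new_arr.append(numbers[i])
--                 count -= 1
--     elif type == "even":
--         for i in range(len(numbers) - 1, -1, -1):
--             if numbers[i] % 2 == 0 and count > 0:
--                 new_arr.append(numbers[i])
--                 count -= 1
--
--     reversed_arr = []
--
--     for i in range(len(new_arr) - 1, -1, -1):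
--         reversed_arr.append(new_arr[i])
--
--     new_arr = reversed_arr
--
--     return new_arr
-- ===== SOURCE B (Python) =====
-- def last_elements(numbers, count, type):
--     if type == "odd":
--         matches = [n for n in numbers if n % 2 != 0]
--     elif type == "even":
--         matches = [n for n in numbers if n % 2 == 0]
--     else:
--         matches = []
--     if count <= 0:
--         return []
--     return matches[-count:]
-- ===== Notes on version B (the rewrite author's own statement) =====
-- stated objective: simpler
-- what changed: Replaces A's backward scan with a decrementing counter plus a second index-loop reversal by a single forward parity filter followed by a guarded tail slice matches[-count:].
import Mathlib
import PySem

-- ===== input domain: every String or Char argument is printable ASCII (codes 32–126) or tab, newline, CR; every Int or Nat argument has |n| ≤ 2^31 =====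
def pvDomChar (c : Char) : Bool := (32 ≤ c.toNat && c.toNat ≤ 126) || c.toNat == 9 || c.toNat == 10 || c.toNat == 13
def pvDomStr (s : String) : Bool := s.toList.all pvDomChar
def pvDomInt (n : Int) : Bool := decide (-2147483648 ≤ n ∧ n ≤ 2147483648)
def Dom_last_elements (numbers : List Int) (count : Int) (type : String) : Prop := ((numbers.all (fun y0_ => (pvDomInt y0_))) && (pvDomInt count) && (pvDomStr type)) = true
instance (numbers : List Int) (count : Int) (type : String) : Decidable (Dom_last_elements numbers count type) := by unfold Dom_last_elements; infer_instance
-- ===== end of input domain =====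

-- B replaces the backward counting scan + index-loop reversal by a forward parity filter and a guarded tail slice (simpler; return value only).

-- ===== PORT A =====
def last_elements (numbers : List Int) (count : Int) (type : String) : List Int :=
  let st : List Int × Int :=
    if type = "odd" then
      (PySem.List.pyRange ((numbers.length : Int) - 1) (-1) (-1)).foldl
        (fun (st : List Int × Int) i =>
          if PySem.Int.mod (PySem.List.pyGetD numbers i 0) 2 ≠ 0 ∧ st.2 > 0 then
            (st.1 ++ [PySem.List.pyGetD numbers i 0], st.2 - 1)
          else st) ([], count)
    else if type = "even" then
      (PySem.List.pyRange ((numbers.length : Int) - 1) (-1) (-1)).foldl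
        (fun (st : List Int × Int) i =>
          if PySem.Int.mod (PySem.List.pyGetD numbers i 0) 2 = 0 ∧ st.2 > 0 then
            (st.1 ++ [PySem.List.pyGetD numbers i 0], st.2 - 1)
          else st) ([], count)
    else ([], count)
  let new_arr := st.1
  let reversed_arr := (PySem.List.pyRange ((new_arr.length : Int) - 1) (-1) (-1)).foldl
      (fun (acc : List Int) i => acc ++ [PySem.List.pyGetD new_arr i 0]) []
  reversed_arr

-- ===== PORT B =====
def last_elements_alt (numbers : List Int) (count : Int) (type : String) : List Int :=
  let ms : List Int :=
    if type = "odd" then numbers.filter (fun n => PySem.Int.mod n 2 ≠ 0)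
    else if type = "even" then numbers.filter (fun n => PySem.Int.mod n 2 = 0)
    else []
  if count ≤ 0 then []
  else PySem.List.slice ms (some (-count)) none

-- ===== PRECONDITION & SPEC =====
def Spec_last_elements (numbers : List Int) (count : Int) (type : String) (out : List Int) : Prop := out = last_elements_alt numbers count type
instance (numbers : List Int) (count : Int) (type : String) (out : List Int) : Decidable (Spec_last_elements numbers count type out) := by unfold Spec_last_elements; infer_instance

-- ===== CLAIM (what is proved, stated in full; the proofs are below) =====
def Claim_equal_last_elements : Prop := ∀ (numbers : List Int) (count : Int) (type : String), Dom_last_elements numbers count type → Spec_last_elements numbers count type (last_elements numbers count type)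

-- ===== LEMMAS AND PROOFS =====

-- a countdown index loop over xs reads xs back to front
theorem foldl_countdown {β : Type} (xs : List Int) (d : Int) (f : β → Int → β) (init : β) :
    (PySem.List.pyRange ((xs.length : Int) - 1) (-1) (-1)).foldl
      (fun acc i => f acc (PySem.List.pyGetD xs i d)) init = xs.reverse.foldl f init := by
  rw [PySem.List.pyRange_neg_one_eq_reverse,
      show ((-1 : Int) + 1) = 0 from by norm_num,
      show ((xs.length : Int) - 1 + 1) = (xs.length : Int) from by ring]
  conv_rhs => rw [← PySem.List.map_pyGetD_pyRange_zero' xs d]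
  rw [← List.map_reverse, List.foldl_map]

-- A's second loop is a reversal
theorem rev_loop (m : List Int) :
    (PySem.List.pyRange ((m.length : Int) - 1) (-1) (-1)).foldl
      (fun (acc : List Int) i => acc ++ [PySem.List.pyGetD m i 0]) [] = m.reverse :=
  (foldl_countdown m 0 (fun acc x => acc ++ [x]) []).trans
    (by rw [PySem.List.foldl_append_singleton]; simp)

-- the counting loop collects the first count.toNat elements satisfying P, appended to the accumulator
theorem foldl_take_count (P : Int → Prop) [DecidablePred P] (l : List Int) (arr : List Int) (c : Int) :
    (l.foldl (fun (st : List Int × Int) x =>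
        if P x ∧ st.2 > 0 then (st.1 ++ [x], st.2 - 1) else st) (arr, c)).1
      = arr ++ (l.filter (fun x => decide (P x))).take c.toNat := by
  induction l generalizing arr c with
  | nil => simp
  | cons x xs ih =>
    simp only [List.foldl_cons]
    by_cases hp : P x
    · by_cases hc : c > 0
      · rw [if_pos ⟨hp, hc⟩, ih, List.filter_cons_of_pos (by simpa using hp)]
        have h1 : c.toNat = (c - 1).toNat + 1 := by omega
        rw [h1, List.take_succ_cons, List.append_assoc]
        rfl
      · rw [if_neg (by tauto), ih, List.filter_cons_of_pos (by simpa using hp)]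
        have h0 : c.toNat = 0 := by omega
        simp [h0]
    · rw [if_neg (by tauto), ih, List.filter_cons_of_neg (by simpa using hp)]

-- the tail slice of the forward filter equals the reversed prefix of the reversed filter
theorem take_reverse_eq_tail (M : List Int) (count : Int) (hc : 0 < count) :
    ((M.reverse.take count.toNat).reverse : List Int)
      = PySem.List.slice M (some (-count)) none := by
  have : -count = -((count.toNat : Nat) : Int) := by omega
  rw [this, PySem.List.slice_from_neg_natCast M count.toNat (by omega)]
  rw [List.take_reverse, List.reverse_reverse]

-- ===== VERDICT (by name: the statement is the Claim_ definition above) =====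
theorem last_elements_spec : Claim_equal_last_elements := by
  intro numbers count type _
  show last_elements numbers count type = last_elements_alt numbers count type
  unfold last_elements last_elements_alt
  by_cases hodd : type = "odd"
  · subst hodd
    simp only [String.reduceEq, reduceIte]
    rw [rev_loop]
    have h1 := foldl_countdown numbers 0
      (fun (st : List Int × Int) x =>
        if PySem.Int.mod x 2 ≠ 0 ∧ st.2 > 0 then (st.1 ++ [x], st.2 - 1) else st) ([], count)
    beta_reduce at h1
    rw [h1, foldl_take_count (fun x => PySem.Int.mod x 2 ≠ 0) numbers.reverse [] count,
        List.filter_reverse]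
    by_cases hc : count ≤ 0
    · have h0 : count.toNat = 0 := by omega
      simp [h0, hc]
    · rw [if_neg hc, ← take_reverse_eq_tail _ count (by omega)]
      simp
  · by_cases heven : type = "even"
    · subst heven
      simp only [String.reduceEq, reduceIte]
      rw [rev_loop]
      have h1 := foldl_countdown numbers 0
        (fun (st : List Int × Int) x =>
          if PySem.Int.mod x 2 = 0 ∧ st.2 > 0 then (st.1 ++ [x], st.2 - 1) else st) ([], count)
      beta_reduce at h1
      rw [h1, foldl_take_count (fun x => PySem.Int.mod x 2 = 0) numbers.reverse [] count,
          List.filter_reverse]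
      by_cases hc : count ≤ 0
      · have h0 : count.toNat = 0 := by omega
        simp [h0, hc]
      · rw [if_neg hc, ← take_reverse_eq_tail _ count (by omega)]
        simp
    · simp only [if_neg hodd, if_neg heven]
      rw [show ((([] : List Int).length : Int) - 1) = -1 from by simp]
      rw [PySem.List.pyRange_neg_one_eq_nil le_rfl]
      by_cases hc : count ≤ 0
      · simp [hc]
      · rw [if_neg hc]
        simp [PySem.List.slice]
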